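-- pv_equiv track=rewrite | github.com/certara/pyDarwin | src/darwin/algorithms/OPT.py | get_duplicate_models
-- ===== SOURCE A (Python) =====
-- import itertools
--
-- def get_duplicate_models(code_masked, search_cooridinates):
--
--
--     # Get variables
--     masked_variables = [pos for pos, char in enumerate(code_masked) if char == "*"]
--
--     # Get token values for masked variables
--     masked_variable_values = {}
--     for mv in masked_variables:
--         masked_variable_values[mv] = search_cooridinates[mv]
--         token_vals = search_cooridinates[mv]
--
--     # Get all equivelent variable sets
--     token_vals = list(masked_variable_values.values())
--     all_token_val_combinations = list(itertools.product(*token_vals))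
--
--     # Generate all equivlent model codes
--     equivalent_model_codes = []
--     for token_val_combo in all_token_val_combinations:
--
--         model_code = list(code_masked)
--
--         for i, v in enumerate(token_val_combo):
--             token_pos = masked_variables[i]
--             token_val = v
--             model_code[token_pos] = str(token_val)
--
--         equivalent_model_codes.append("".join(model_code))
--
--     return equivalent_model_codes
-- ===== SOURCE B (Python) =====
-- def get_duplicate_models(code_masked, search_cooridinates):
--     # Iterative expansion: grow the result set one masked position at a time,
--     # never materializing the full itertools.product.
--     results = [list(code_masked)]
--     for pos, ch in enumerate(code_masked):
--         if ch == "*":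
--             vals = search_cooridinates[pos]
--             expanded = []
--             for r in results:
--                 for v in vals:
--                     r2 = r.copy()
--                     r2[pos] = str(v)
--                     expanded.append(r2)
--             results = expanded
--     return ["".join(r) for r in results]
-- ===== Notes on version B (the rewrite author's own statement) =====
-- stated objective: alternative
-- what changed: Replaces the dict-of-masked-values + itertools.product + fill-into-a-fresh-copy pipeline by a single left-to-right pass over the string that expands the partial result list at each '*' position (copy-and-set), never materializing the product of value tuples.
import Mathlib
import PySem

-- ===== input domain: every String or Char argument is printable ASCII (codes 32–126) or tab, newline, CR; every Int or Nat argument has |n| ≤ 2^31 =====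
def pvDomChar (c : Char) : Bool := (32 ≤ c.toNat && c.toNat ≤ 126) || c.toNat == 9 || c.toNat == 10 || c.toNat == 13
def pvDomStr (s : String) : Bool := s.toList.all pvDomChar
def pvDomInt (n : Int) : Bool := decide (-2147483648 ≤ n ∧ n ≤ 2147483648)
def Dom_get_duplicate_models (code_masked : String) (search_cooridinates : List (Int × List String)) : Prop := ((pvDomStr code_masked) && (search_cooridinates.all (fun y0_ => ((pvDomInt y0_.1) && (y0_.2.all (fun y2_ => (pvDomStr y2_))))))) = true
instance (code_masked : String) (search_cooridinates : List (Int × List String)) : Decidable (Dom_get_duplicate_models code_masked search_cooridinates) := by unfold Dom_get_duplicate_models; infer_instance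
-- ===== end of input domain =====

-- B replaces dict + itertools.product + fill by one left-to-right expansion pass; equal output proved on Pre_ (every masked position present in the dict).

-- ===== PORT A =====
-- itertools.product over a list of string lists (leftmost varies slowest)
def pyProductS : List (List String) → List (List String)
  | [] => [[]]
  | xs :: rest => xs.flatMap (fun x => (pyProductS rest).map (x :: ·))

def get_duplicate_models (code_masked : String) (search_cooridinates : List (Int × List String)) : List String :=
  let chars := code_masked.toList
  let masked_variables : List Int :=
    ((PySem.List.enumerate chars 0).filter (fun pc => pc.2 == '*')).map (·.1)
  let scd : PySem.Dict Int (List String) := PySem.Dict.mk search_cooridinates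
  -- dict lookup search_cooridinates[mv]: KeyError (none) is excluded by Pre_, so .getD [] is only reached outside Pre_
  let mvv : PySem.Dict Int (List String) :=
    masked_variables.foldl (fun d mv => d.insert mv ((scd.get? mv).getD [])) PySem.Dict.empty
  let token_vals := mvv.values
  let all_token_val_combinations := pyProductS token_vals
  all_token_val_combinations.map (fun combo =>
    let model_code := chars.map (fun c => String.mk [c])
    let filled := (PySem.List.enumerate combo 0).foldl (fun mc iv =>
        -- masked_variables[i]: i < len(combo) = len(masked_variables), so in range; total .getD 0 never reached
        let token_pos := (PySem.List.pyGet? masked_variables iv.1).getD 0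
        PySem.List.pySetD mc token_pos iv.2) model_code
    PySem.Str.join "" filled)

-- ===== PORT B =====
def get_duplicate_models_alt (code_masked : String) (search_cooridinates : List (Int × List String)) : List String :=
  let chars := code_masked.toList
  let scd : PySem.Dict Int (List String) := PySem.Dict.mk search_cooridinates
  let results := (PySem.List.enumerate chars 0).foldl
    (fun rs pc =>
      if pc.2 == '*' then
        -- KeyError on a missing masked position is excluded by Pre_ (.getD [] unreached there)
        rs.flatMap (fun r => ((scd.get? pc.1).getD []).map (fun v => PySem.List.pySetD r pc.1 v))
      else rs)
    [chars.map (fun c => String.mk [c])]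
  results.map (fun r => PySem.Str.join "" r)

-- ===== PRECONDITION & SPEC =====
-- Pre_ excludes exactly the inputs where A raises KeyError: a '*' position with no entry in search_cooridinates.
def Pre_get_duplicate_models (code_masked : String) (search_cooridinates : List (Int × List String)) : Prop :=
  ∀ pc ∈ PySem.List.enumerate code_masked.toList 0, pc.2 = '*' →
    (PySem.Dict.mk search_cooridinates).contains pc.1 = true
instance (code_masked : String) (search_cooridinates : List (Int × List String)) : Decidable (Pre_get_duplicate_models code_masked search_cooridinates) := by unfold Pre_get_duplicate_models; infer_instance

def pvWitness_get_duplicate_models : String × (List (Int × List String)) :=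
  ("a*b*", [(1, ["x", "yy"]), (3, ["0", "1"])])

def Spec_get_duplicate_models (code_masked : String) (search_cooridinates : List (Int × List String)) (out : List String) : Prop := out = get_duplicate_models_alt code_masked search_cooridinates
instance (code_masked : String) (search_cooridinates : List (Int × List String)) (out : List String) : Decidable (Spec_get_duplicate_models code_masked search_cooridinates out) := by unfold Spec_get_duplicate_models; infer_instance

-- ===== CLAIM (what is proved, stated in full; the proofs are below) =====
def Claim_equal_get_duplicate_models : Prop := ∀ (code_masked : String) (search_cooridinates : List (Int × List String)), Dom_get_duplicate_models code_masked search_cooridinates → Pre_get_duplicate_models code_masked search_cooridinates → Spec_get_duplicate_models code_masked search_cooridinates (get_duplicate_models code_masked search_cooridinates)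

-- ===== LEMMAS AND PROOFS =====

-- the common expansion fold both ports reduce to
def pvExpand (pairs : List (Int × List String)) (base : List (List String)) : List (List String) :=
  pairs.foldl (fun rs pv => rs.flatMap (fun r => pv.2.map (fun v => PySem.List.pySetD r pv.1 v))) base

lemma pvExpand_cons (pv : Int × List String) (rest : List (Int × List String)) (rs : List (List String)) :
    pvExpand (pv :: rest) rs = pvExpand rest (rs.flatMap (fun r => pv.2.map (fun v => PySem.List.pySetD r pv.1 v))) := rfl

lemma pvExpand_flatMap (pairs : List (Int × List String)) (rs : List (List String)) :
    pvExpand pairs rs = rs.flatMap (fun r => pvExpand pairs [r]) := by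
  induction pairs generalizing rs with
  | nil => simp [pvExpand]
  | cons pv rest ih =>
      rw [pvExpand_cons, ih, List.flatMap_assoc]
      refine List.flatMap_congr (fun r _ => ?_)
      rw [pvExpand_cons, ih, List.flatMap_singleton]

lemma pvLen_mem_pyProductS (Ls : List (List String)) (c : List String) (h : c ∈ pyProductS Ls) :
    c.length = Ls.length := by
  induction Ls generalizing c with
  | nil => simp [pyProductS] at h; simp [h]
  | cons xs rest ih =>
      simp only [pyProductS, List.mem_flatMap, List.mem_map] at h
      obtain ⟨x, _, c', hc', rfl⟩ := h
      simp [ih c' hc']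

-- A's enumerate-and-index fill equals the zip fold
lemma pvFill_enum_zip (combo : List String) (pre mvs : List Int) (base : List String)
    (h : combo.length = mvs.length) :
    (PySem.List.enumerate combo (pre.length : Int)).foldl (fun mc iv =>
        PySem.List.pySetD mc ((PySem.List.pyGet? (pre ++ mvs) iv.1).getD 0) iv.2) base
    = (mvs.zip combo).foldl (fun mc pv => PySem.List.pySetD mc pv.1 pv.2) base := by
  induction combo generalizing pre mvs base with
  | nil =>
      cases mvs with
      | nil => simp [PySem.List.enumerate_nil]
      | cons m ms => simp at h
  | cons v rest ih =>
      cases mvs with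
      | nil => simp at h
      | cons m ms =>
          rw [PySem.List.enumerate_cons]
          simp only [List.foldl_cons, List.zip_cons_cons]
          have hget : PySem.List.pyGet? (pre ++ m :: ms) (pre.length : Int) = some m := by
            rw [PySem.List.pyGet?_natCast]
            simp
          rw [hget]
          have hlist : pre ++ m :: ms = (pre ++ [m]) ++ ms := by simp
          have hcast : (pre.length : Int) + 1 = (((pre ++ [m]).length : Nat) : Int) := by
            simp
          rw [hlist, hcast]
          exact ih (pre ++ [m]) ms (PySem.List.pySetD base m v) (by simpa using h)

-- product-then-fill = iterative expansion
lemma pvProd_fill (pairs : List (Int × List String)) (base : List String) :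
    (pyProductS (pairs.map (·.2))).map (fun combo =>
      ((pairs.map (·.1)).zip combo).foldl (fun mc pv => PySem.List.pySetD mc pv.1 pv.2) base)
    = pvExpand pairs [base] := by
  induction pairs generalizing base with
  | nil => simp [pyProductS, pvExpand]
  | cons pv rest ih =>
      simp only [List.map_cons, pyProductS, List.map_flatMap, List.map_map]
      rw [pvExpand, List.foldl_cons, ← pvExpand]
      rw [pvExpand_flatMap]
      simp only [List.flatMap_singleton, List.flatMap_map]
      apply List.flatMap_congr  -- pointwise
      intro v _
      rw [← ih (PySem.List.pySetD base pv.1 v)]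
      simp [Function.comp]

lemma pvMasked_nodup (chars : List Char) :
    (((PySem.List.enumerate chars 0).filter (fun pc => pc.2 == '*')).map (·.1)).Nodup := by
  have h1 : (PySem.List.enumerate chars 0).Pairwise (fun p q => p.1 < q.1) :=
    PySem.List.pairwise_lt_enumerate chars 0
  have h2 := List.Pairwise.filter (p := fun pc => pc.2 == '*') h1
  rw [List.nodup_iff_pairwise_ne, List.pairwise_map]
  exact h2.imp (fun h => ne_of_lt h)

lemma pvValues_foldl (mvs : List Int) (lk : Int → List String) (hnd : mvs.Nodup) :
    (mvs.foldl (fun d mv => d.insert mv (lk mv)) (PySem.Dict.empty : PySem.Dict Int (List String))).values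
    = mvs.map lk := by
  have h := PySem.Dict.items_foldl_insert_fresh (l := mvs) (k := fun mv => mv)
      (v := fun mv => lk mv) (d := (PySem.Dict.empty : PySem.Dict Int (List String)))
      (by intro a _; simp) (by simpa using hnd)
  dsimp only at h
  simp only [PySem.Dict.values]
  rw [h]
  have he : (PySem.Dict.empty : PySem.Dict Int (List String)).items = [] := rfl
  simp [he, Function.comp]

-- ===== VERDICT (by name: the statement is the Claim_ definition above) =====
lemma pvMapJoin {α : Type} (L : List α) (f : α → List String) :
    L.map (fun c => PySem.Str.join "" (f c)) = (L.map f).map (fun r => PySem.Str.join "" r) := by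
  rw [List.map_map]; rfl

theorem get_duplicate_models_spec : Claim_equal_get_duplicate_models := by
  intro code_masked sc _ _
  unfold Spec_get_duplicate_models get_duplicate_models get_duplicate_models_alt
  dsimp only
  generalize code_masked.toList = chars
  generalize ({ items := sc } : PySem.Dict Int (List String)) = scd
  have hnd : (List.map (fun x => x.1) (List.filter (fun pc => pc.2 == '*') (PySem.List.enumerate chars 0))).Nodup :=
    pvMasked_nodup chars
  have hv := pvValues_foldl
      (List.map (fun x => x.1) (List.filter (fun pc => pc.2 == '*') (PySem.List.enumerate chars 0)))
      (fun mv => (scd.get? mv).getD []) hnd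
  dsimp only at hv
  rw [hv]
  set mvs : List Int := List.map (fun x => x.1) (List.filter (fun pc => pc.2 == '*') (PySem.List.enumerate chars 0)) with hmvs
  set base : List String := List.map (fun c => String.mk [c]) chars with hbase
  set pairs : List (Int × List String) := mvs.map (fun mv => (mv, (scd.get? mv).getD [])) with hpairs
  have hA : (pyProductS (mvs.map (fun mv => (scd.get? mv).getD []))).map (fun combo =>
      (PySem.List.enumerate combo 0).foldl (fun mc iv =>
        PySem.List.pySetD mc ((PySem.List.pyGet? mvs iv.1).getD 0) iv.2) base)
      = pvExpand pairs [base] := by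
    have hm2 : pairs.map (fun p => p.2) = mvs.map (fun mv => (scd.get? mv).getD []) := by
      rw [hpairs, List.map_map]; rfl
    have hm1 : pairs.map (fun p => p.1) = mvs := by
      rw [hpairs, List.map_map]; simp [Function.comp_def]
    rw [← pvProd_fill pairs base, hm2, hm1]
    apply List.map_congr_left
    intro combo hc
    have hlen : combo.length = mvs.length := by
      have := pvLen_mem_pyProductS _ combo hc; simpa using this
    have := pvFill_enum_zip combo [] mvs base (by simpa using hlen)
    simpa using this
  have hB : (PySem.List.enumerate chars 0).foldl
      (fun rs pc => if (pc.2 == '*') = true then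
          rs.flatMap (fun r => ((scd.get? pc.1).getD []).map (fun v => PySem.List.pySetD r pc.1 v))
        else rs) [base]
      = pvExpand pairs [base] := by
    rw [PySem.List.foldl_if_eq_foldl_filter]
    rw [hpairs, hmvs, List.map_map, pvExpand, List.foldl_map]
    rfl
  rw [pvMapJoin, hA, hB]
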